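-- pv_equiv track=rewrite | github.com/daniel-reich/turbo-robot | ojNRprg7fKpWJpj47_22.py | shift_sentence
-- ===== SOURCE A (Python) =====
-- def shift_sentence(txt):
--     txt = txt.split(' ')
--     ans = list(list(i) for i in txt)
--     first = ans[0][0]
--     for i in range(len(ans)-1):
--         ans[i+1][0],first=first,ans[i+1][0]
--     ans[0][0]=first
--     return " ".join(list("".join(i) for i in ans))
-- ===== SOURCE B (Python) =====
-- def shift_sentence(txt):
--     words = txt.split(' ')
--     firsts = [w[0] for w in words]
--     rotated = firsts[-1:] + firsts[:-1]
--     return ' '.join(r + w[1:] for r, w in zip(rotated, words))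
-- ===== Notes on version B (the rewrite author's own statement) =====
-- stated objective: simpler
-- what changed: Replaces the in-place swap loop that threads a temporary through mutable character lists with an extract-rotate-reassemble pass: collect first letters, rotate them right by slicing, and zip them back onto the word tails.
import Mathlib
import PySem

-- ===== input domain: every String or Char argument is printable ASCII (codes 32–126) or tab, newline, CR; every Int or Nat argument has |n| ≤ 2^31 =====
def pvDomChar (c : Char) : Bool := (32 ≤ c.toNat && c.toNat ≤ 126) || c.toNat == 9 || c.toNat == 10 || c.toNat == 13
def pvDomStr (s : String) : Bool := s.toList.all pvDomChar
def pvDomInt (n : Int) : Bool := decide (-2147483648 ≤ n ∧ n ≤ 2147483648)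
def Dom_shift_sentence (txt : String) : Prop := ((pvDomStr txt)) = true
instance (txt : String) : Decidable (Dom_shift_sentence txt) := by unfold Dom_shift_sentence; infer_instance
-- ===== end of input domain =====

-- B replaces A's in-place swap loop (threading a temporary through mutable char lists) with an
-- extract-rotate-reassemble pass: collect first letters, rotate right by slicing, zip back onto tails.
-- Equal return value on Pre_ (no empty words, where the Python A raises IndexError — and so does B).

-- ===== PORT A =====
-- the for-loop over range(len(ans)-1): carries 'first' forward, writing it into the
-- head slot of the next word and carrying that word's old head on; returns the final 'first'
def pvLoopA : Char → List (List Char) → List (List Char) × Char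
  | f, [] => ([], f)
  | f, w :: rest =>
      let r := pvLoopA (w.headD ' ') rest
      ((f :: w.tail) :: r.1, r.2)

def shift_sentence (txt : String) : String :=
  let ans := PySem.Chars.splitOn txt.toList [' ']
  match ans with
  | [] => ""  -- unreachable: split(' ') always yields at least one piece
  | a0 :: rest =>
      let first := a0.headD ' '            -- ans[0][0]; empty word excluded by Pre_
      let r := pvLoopA first rest
      String.mk (PySem.Chars.join [' '] ((r.2 :: a0.tail) :: r.1))

-- ===== PORT B =====
def shift_sentence_alt (txt : String) : String :=
  let words := PySem.Chars.splitOn txt.toList [' ']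
  let firsts := words.map (fun w => w.headD ' ')   -- w[0]; empty word excluded by Pre_
  let rotated := PySem.List.slice firsts (some (-1)) none ++ PySem.List.slice firsts none (some (-1))
  String.mk (PySem.Chars.join [' ']
    ((List.zip rotated words).map (fun rw => rw.1 :: PySem.List.slice rw.2 (some 1) none)))

-- ===== PRECONDITION & SPEC =====
-- Pre_ excludes exactly the inputs with an empty word (adjacent/leading/trailing spaces or
-- the empty string), where the Python A raises IndexError (as does the Python B).
def Pre_shift_sentence (txt : String) : Prop :=
  ∀ w ∈ PySem.Chars.splitOn txt.toList [' '], w ≠ []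
instance (txt : String) : Decidable (Pre_shift_sentence txt) := by
  unfold Pre_shift_sentence; infer_instance

def pvWitness_shift_sentence : String := "cat dog bird"

def Spec_shift_sentence (txt : String) (out : String) : Prop := out = shift_sentence_alt txt
instance (txt : String) (out : String) : Decidable (Spec_shift_sentence txt out) := by unfold Spec_shift_sentence; infer_instance

-- ===== CLAIM (what is proved, stated in full; the proofs are below) =====
def Claim_equal_shift_sentence : Prop := ∀ (txt : String), Dom_shift_sentence txt → Pre_shift_sentence txt → Spec_shift_sentence txt (shift_sentence txt)

-- ===== LEMMAS AND PROOFS =====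

-- A's loop, characterised: the produced words pair the carried heads with the tails,
-- and the final carry is the last head.
theorem pvLoopA_fst (f : Char) (ws : List (List Char)) :
    (pvLoopA f ws).1 =
      List.zipWith (fun c w => c :: w.tail) ((f :: ws.map (fun w => w.headD ' ')).dropLast) ws := by
  induction ws generalizing f with
  | nil => simp [pvLoopA]
  | cons w rest ih =>
      simp only [pvLoopA, List.map_cons]
      rw [List.dropLast_cons_of_ne_nil (by simp)]
      simp [ih]

theorem pvLoopA_snd (f : Char) (ws : List (List Char)) :
    (pvLoopA f ws).2 = (ws.map (fun w => w.headD ' ')).getLastD f := by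
  induction ws generalizing f with
  | nil => simp [pvLoopA]
  | cons w rest ih =>
      simp only [pvLoopA, List.map_cons, List.getLastD_cons]
      exact ih _

theorem pv_zip_map_eq_zipWith (xs : List Char) (ys : List (List Char)) :
    (List.zip xs ys).map (fun rw => rw.1 :: PySem.List.slice rw.2 (some 1) none) =
      List.zipWith (fun c w => c :: w.tail) xs ys := by
  induction xs generalizing ys with
  | nil => simp
  | cons x xs ih =>
      cases ys with
      | nil => simp
      | cons y ys =>
          simp only [List.zip_cons_cons, List.map_cons, List.zipWith_cons_cons, ih]
          simp [PySem.List.slice_from_one]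

-- xs[-1:] of a nonempty list is its last element
theorem pv_drop_length (x : Char) (l : List Char) :
    (x :: l).drop l.length = [l.getLastD x] := by
  induction l generalizing x with
  | nil => simp
  | cons y ys ih =>
      rw [List.getLastD_cons]
      simpa using ih y

-- ===== VERDICT (by name: the statement is the Claim_ definition above) =====
theorem shift_sentence_spec : Claim_equal_shift_sentence := by
  intro txt _ _
  unfold Spec_shift_sentence shift_sentence shift_sentence_alt
  cases h : PySem.Chars.splitOn txt.toList [' '] with
  | nil => rfl
  | cons a0 rest =>
      simp only [List.map_cons]
      rw [pv_zip_map_eq_zipWith, PySem.List.slice_from_neg_one, PySem.List.slice_to_neg_one]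
      cases rest with
      | nil => simp [pvLoopA]
      | cons b bs =>
          rw [show (a0.headD ' ' :: List.map (fun w => w.headD ' ') (b :: bs)).length - 1
                = (List.map (fun w => w.headD ' ') (b :: bs)).length by simp]
          rw [pv_drop_length]
          simp [pvLoopA_fst, pvLoopA_snd]
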